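-- pv_equiv track=rewrite | github.com/ggrelaxi/course3-algorythm-tasks | task28.py | Keymaker
-- ===== SOURCE A (Python) =====
-- def Keymaker(K):
--     doors = []
--
--     for i in range(K):
--         doors.append(False)
--
--     for i in range(0, K):
--         if i == 0:
--             for j in range(K):
--                 doors[j] = True
--
--         elif i == 1:
--             for m in range(1, K, 2):
--                 doors[m] = False
--
--         elif i == 2:
--             for y in range(2, K, 3):
--                 value = doors[y]
--                 if value == True:
--                     doors[y] = False
--                 else:
--                     doors[y] = True
--
--         else:
--             for x in range(i, K, i):
--                 nextvalue = doors[i]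
--
--                 if nextvalue == True:
--                     doors[i] == False
--                 else:
--                     doors[i] == True
--
--     result = ""
--
--     for z in range(K):
--         if doors[z] == True:
--             result += "1"
--         else:
--             result += "0"
--
--     return result
-- ===== SOURCE B (Python) =====
-- def Keymaker(K):
--     return "".join("1" if (z % 2 == 0) != (z % 3 == 2) else "0" for z in range(K))
-- ===== Notes on version B (the rewrite author's own statement) =====
-- stated objective: simpler
-- what changed: Replaces A's staged sweeps over a doors list (init all-False, set all True, set odd indices False, toggle indices ≡ 2 mod 3, plus dead no-op loops for i ≥ 3) with a single pass that computes each character directly from the closed form: door z is on iff (z % 2 == 0) XOR (z % 3 == 2).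
import Mathlib
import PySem

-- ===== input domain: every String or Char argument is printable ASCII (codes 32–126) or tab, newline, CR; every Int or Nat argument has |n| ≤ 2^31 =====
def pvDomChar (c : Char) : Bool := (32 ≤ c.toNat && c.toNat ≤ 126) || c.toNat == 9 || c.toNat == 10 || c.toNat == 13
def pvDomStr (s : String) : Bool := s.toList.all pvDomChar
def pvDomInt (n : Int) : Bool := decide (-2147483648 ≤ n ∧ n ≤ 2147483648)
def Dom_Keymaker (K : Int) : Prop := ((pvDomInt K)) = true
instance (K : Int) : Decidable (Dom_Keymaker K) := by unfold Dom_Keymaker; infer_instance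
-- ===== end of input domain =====

-- B replaces A's four staged sweeps over the doors list (of which the i ≥ 3 loops are
-- no-ops) by a single pass computing each door directly: door z is on iff (z even) XOR (z % 3 == 2).

-- ===== PORT A =====
def Keymaker (K : Int) : String :=
  let doors0 : List Bool := (PySem.List.pyRange 0 K 1).foldl (fun d _i => d ++ [false]) []
  let doors : List Bool := (PySem.List.pyRange 0 K 1).foldl (fun d i =>
    if i == 0 then
      (PySem.List.pyRange 0 K 1).foldl (fun d j => d.set j.toNat true) d
    else if i == 1 then
      (PySem.List.pyRange 1 K 2).foldl (fun d m => d.set m.toNat false) d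
    else if i == 2 then
      (PySem.List.pyRange 2 K 3).foldl (fun d y =>
        let value := PySem.List.pyGetD d y false
        if value == true then d.set y.toNat false else d.set y.toNat true) d
    else
      -- Python's else-branch only READS doors[i] and compares (== not =): no mutation
      (PySem.List.pyRange i K i).foldl (fun d _x =>
        let _nextvalue := PySem.List.pyGetD d i false
        d) d) doors0
  String.ofList ((PySem.List.pyRange 0 K 1).foldl (fun r z =>
    if PySem.List.pyGetD doors z false == true then r ++ ['1'] else r ++ ['0']) [])

-- ===== PORT B =====
def Keymaker_alt (K : Int) : String :=
  String.ofList ((PySem.List.pyRange 0 K 1).map (fun z =>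
    if (PySem.Int.mod z 2 == 0) != (PySem.Int.mod z 3 == 2) then '1' else '0'))

-- ===== PRECONDITION & SPEC =====
def Spec_Keymaker (K : Int) (out : String) : Prop := out = Keymaker_alt K
instance (K : Int) (out : String) : Decidable (Spec_Keymaker K out) := by unfold Spec_Keymaker; infer_instance

-- ===== CLAIM (what is proved, stated in full; the proofs are below) =====
def Claim_equal_Keymaker : Prop := ∀ (K : Int), Dom_Keymaker K → Spec_Keymaker K (Keymaker K)

-- ===== LEMMAS AND PROOFS =====

-- generic shape of A's three effective sweeps: set index i.toNat to g i (old value)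
def pvStep (g : Int → Bool → Bool) : List Bool → Int → List Bool :=
  fun d i => d.set i.toNat (g i (PySem.List.pyGetD d i false))

theorem pvStep_length (g : Int → Bool → Bool) (l : List Int) (d : List Bool) :
    (l.foldl (pvStep g) d).length = d.length := by
  induction l generalizing d with
  | nil => rfl
  | cons i l ih => simp [List.foldl_cons, ih, pvStep, List.length_set]

theorem pvStep_get_notmem (g : Int → Bool → Bool) (l : List Int) (d : List Bool) (z : Nat)
    (hmem : (z : Int) ∉ l) (hpos : ∀ i ∈ l, 0 ≤ i) :
    (l.foldl (pvStep g) d).getD z false = d.getD z false := by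
  induction l generalizing d with
  | nil => rfl
  | cons i l ih =>
    simp only [List.foldl_cons]
    rw [ih _ (by simp at hmem; exact hmem.2) (by intro j hj; exact hpos j (List.mem_cons_of_mem _ hj))]
    have hne : i.toNat ≠ z := by
      have h0 : 0 ≤ i := hpos i (List.mem_cons_self)
      have : i ≠ (z : Int) := by intro h; exact hmem (h ▸ List.mem_cons_self)
      omega
    simp [pvStep, List.getD_eq_getElem?_getD, List.getElem?_set_ne hne]

theorem pvStep_get_mem (g : Int → Bool → Bool) (l : List Int) (d : List Bool) (z : Nat)
    (hz : z < d.length) (hmem : (z : Int) ∈ l) (hnd : l.Nodup) (hpos : ∀ i ∈ l, 0 ≤ i) :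
    (l.foldl (pvStep g) d).getD z false = g (z : Int) (d.getD z false) := by
  induction l generalizing d with
  | nil => simp at hmem
  | cons i l ih =>
    simp only [List.foldl_cons]
    by_cases hiz : i = (z : Int)
    · subst hiz
      have hnot : (↑z : Int) ∉ l := (List.nodup_cons.mp hnd).1
      rw [pvStep_get_notmem g l _ z hnot (by intro j hj; exact hpos j (List.mem_cons_of_mem _ hj))]
      simp [pvStep, List.getD_eq_getElem?_getD, List.getElem?_set_self (by simpa using hz),
        PySem.List.pyGetD_natCast]
    · have hmem' : (z : Int) ∈ l := by
        rcases List.mem_cons.mp hmem with h | h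
        · exact absurd h.symm hiz
        · exact h
      rw [ih _ (by simpa [pvStep] using hz) hmem' (List.nodup_cons.mp hnd).2
            (by intro j hj; exact hpos j (List.mem_cons_of_mem _ hj))]
      have hne : i.toNat ≠ z := by
        have h0 : 0 ≤ i := hpos i (List.mem_cons_self)
        omega
      simp [pvStep, List.getD_eq_getElem?_getD, List.getElem?_set_ne hne]

theorem pvNodup_pyRange_pos (a b s : Int) (hs : 0 < s) : (PySem.List.pyRange a b s).Nodup := by
  rw [PySem.List.pyRange_of_pos a b hs]
  refine List.Nodup.map ?_ (List.nodup_range)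
  intro x y h
  have : s * (x : Int) = s * (y : Int) := by linarith
  have := mul_left_cancel₀ (by omega : (s : Int) ≠ 0) this
  exact_mod_cast this

theorem pvPos_pyRange (a b s : Int) (ha : 0 ≤ a) (hs : 0 < s) :
    ∀ i ∈ PySem.List.pyRange a b s, 0 ≤ i := by
  intro i hi
  have := (PySem.List.mem_pyRange_iff_of_pos hs i).mp hi
  omega

theorem pvDoors0 (l : List Int) (init : List Bool) :
    l.foldl (fun d _i => d ++ [false]) init = init ++ List.replicate l.length false := by
  induction l generalizing init with
  | nil => simp
  | cons i l ih =>
    simp [List.foldl_cons, ih, List.replicate_succ]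

-- A's stage-2 body equals the pvStep form with g = (fun _ v => !v)
theorem pvStage2_eq (d : List Bool) (y : Int) :
    (if PySem.List.pyGetD d y false = true then d.set y.toNat false else d.set y.toNat true)
    = pvStep (fun _ v => !v) d y := by
  cases h : PySem.List.pyGetD d y false <;> simp [pvStep, h]

theorem Keymaker_spec : Claim_equal_Keymaker := by
  intro K _hdom
  unfold Spec_Keymaker Keymaker Keymaker_alt
  by_cases hK0 : K ≤ 0
  · simp [PySem.List.pyRange_one_eq_nil hK0]
  by_cases hK1 : K = 1
  · subst hK1; decide
  by_cases hK2 : K = 2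
  · subst hK2; decide
  have hK3 : 3 ≤ K := by omega
  -- the initial doors list: all-false, length n
  set n : Nat := K.toNat with hn
  have hlen0 : ((PySem.List.pyRange 0 K 1).foldl (fun d _i => d ++ [false]) []).length = n := by
    rw [pvDoors0]
    simp [PySem.List.length_pyRange_one, hn]
  -- the main loop: [0,1,2] do the three sweeps, the rest is a no-op
  have hsplit : PySem.List.pyRange 0 K 1 = 0 :: 1 :: 2 :: PySem.List.pyRange 3 K 1 := by
    rw [PySem.List.pyRange_one_cons (by omega), PySem.List.pyRange_one_cons (by omega),
        PySem.List.pyRange_one_cons (by omega)]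
    norm_num
  set body : List Bool → Int → List Bool := fun d i =>
    if i == 0 then
      (PySem.List.pyRange 0 K 1).foldl (fun d j => d.set j.toNat true) d
    else if i == 1 then
      (PySem.List.pyRange 1 K 2).foldl (fun d m => d.set m.toNat false) d
    else if i == 2 then
      (PySem.List.pyRange 2 K 3).foldl (fun d y =>
        let value := PySem.List.pyGetD d y false
        if value == true then d.set y.toNat false else d.set y.toNat true) d
    else
      (PySem.List.pyRange i K i).foldl (fun d _x =>
        let _nextvalue := PySem.List.pyGetD d i false
        d) d with hbody
  have htail : ∀ d : List Bool, (PySem.List.pyRange 3 K 1).foldl body d = d := by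
    intro d
    rw [PySem.List.foldl_congr_mem _ body (fun d _ => d) d ?_]
    · exact List.foldl_fixed _
    · intro acc x hx
      have hx3 : 3 ≤ x ∧ x < K := PySem.List.mem_pyRange_one.mp hx
      have e0 : (x == (0:Int)) = false := by simp; omega
      have e1 : (x == (1:Int)) = false := by simp; omega
      have e2 : (x == (2:Int)) = false := by simp; omega
      simp only [hbody, e0, e1, e2, Bool.false_eq_true, if_false]
      exact List.foldl_fixed _
  -- the three sweeps in pvStep form
  have hsweep : ∀ d : List Bool,
      (PySem.List.pyRange 0 K 1).foldl body d
      = (PySem.List.pyRange 2 K 3).foldl (pvStep (fun _ v => !v))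
          ((PySem.List.pyRange 1 K 2).foldl (pvStep (fun _ _ => false))
            ((PySem.List.pyRange 0 K 1).foldl (pvStep (fun _ _ => true)) d)) := by
    intro d
    have b0 : ∀ e : List Bool, body e 0 = (PySem.List.pyRange 0 K 1).foldl (pvStep (fun _ _ => true)) e := by
      intro e; simp only [hbody]; norm_num; rfl
    have b1 : ∀ e : List Bool, body e 1 = (PySem.List.pyRange 1 K 2).foldl (pvStep (fun _ _ => false)) e := by
      intro e; simp only [hbody]; norm_num; rfl
    have b2 : ∀ e : List Bool, body e 2 = (PySem.List.pyRange 2 K 3).foldl (pvStep (fun _ v => !v)) e := by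
      intro e; simp only [hbody]; norm_num
      exact PySem.List.foldl_congr_mem _ _ _ e (fun acc y _ => pvStage2_eq acc y)
    conv_lhs => rw [hsplit]
    simp only [List.foldl_cons]
    rw [htail, b0, b1, b2]
  set D : List Bool := (PySem.List.pyRange 0 K 1).foldl body
      ((PySem.List.pyRange 0 K 1).foldl (fun d _i => d ++ [false]) []) with hD
  -- elementwise value of the final doors list
  have hval : ∀ z : Nat, z < n →
      D.getD z false = ((decide (z % 2 = 0)) != (decide (z % 3 = 2))) := by
    intro z hz
    set d0 := (PySem.List.pyRange 0 K 1).foldl (fun d _i => d ++ [false]) [] with hd0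
    set d1 := (PySem.List.pyRange 0 K 1).foldl (pvStep (fun _ _ => true)) d0 with hd1
    set d2 := (PySem.List.pyRange 1 K 2).foldl (pvStep (fun _ _ => false)) d1 with hd2
    have hDval : D = (PySem.List.pyRange 2 K 3).foldl (pvStep (fun _ v => !v)) d2 := by
      rw [hD, hsweep]
    have hlen1 : d1.length = n := by rw [hd1, pvStep_length]; exact hlen0
    have hlen2 : d2.length = n := by rw [hd2, pvStep_length]; exact hlen1
    -- sweep 0: everything true
    have h1 : d1.getD z false = true := by
      rw [hd1, pvStep_get_mem (fun _ _ => true) _ _ z (by omega)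
        (PySem.List.mem_pyRange_one.mpr (by omega)) (PySem.List.nodup_pyRange_one 0 K)
        (pvPos_pyRange 0 K 1 (by omega) (by omega))]
    -- sweep 1: odd indices false
    have h2 : d2.getD z false = decide (z % 2 = 0) := by
      by_cases hodd : z % 2 = 1
      · rw [hd2, pvStep_get_mem (fun _ _ => false) _ _ z (by omega)
          ((PySem.List.mem_pyRange_iff_of_pos (by omega) _).mpr (by constructor; omega; constructor; omega; omega))
          (pvNodup_pyRange_pos 1 K 2 (by omega)) (pvPos_pyRange 1 K 2 (by omega) (by omega))]
        simp; omega
      · rw [hd2, pvStep_get_notmem (fun _ _ => false) _ _ z ?_ (pvPos_pyRange 1 K 2 (by omega) (by omega)), h1]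
        · simp; omega
        · intro hmem
          have := (PySem.List.mem_pyRange_iff_of_pos (by omega) ((z:Int))).mp hmem
          omega
    -- sweep 2: indices ≡ 2 (mod 3) toggled
    by_cases h3 : z % 3 = 2
    · rw [hDval, pvStep_get_mem (fun _ v => !v) _ _ z (by omega)
        ((PySem.List.mem_pyRange_iff_of_pos (by omega) _).mpr (by constructor; omega; constructor; omega; omega))
        (pvNodup_pyRange_pos 2 K 3 (by omega)) (pvPos_pyRange 2 K 3 (by omega) (by omega)), h2]
      by_cases hodd : z % 2 = 0 <;> simp [hodd, h3]
    · rw [hDval, pvStep_get_notmem (fun _ v => !v) _ _ z ?_ (pvPos_pyRange 2 K 3 (by omega) (by omega)), h2]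
      · simp [h3]
      · intro hmem
        have := (PySem.List.mem_pyRange_iff_of_pos (by omega) ((z:Int))).mp hmem
        omega
  have hlenD : D.length = n := by rw [hD, hsweep, pvStep_length, pvStep_length, pvStep_length]; exact hlen0
  -- fold building the result string = map, then pointwise agreement
  show String.ofList ((PySem.List.pyRange 0 K 1).foldl (fun r z =>
    if PySem.List.pyGetD D z false == true then r ++ ['1'] else r ++ ['0']) []) = _
  congr 1
  rw [PySem.List.foldl_congr_mem _ _
      (fun (r : List Char) z => r ++ [if PySem.List.pyGetD D z false == true then '1' else '0']) []
      (by intro acc x _; by_cases h : PySem.List.pyGetD D x false == true <;> simp [h])]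
  rw [PySem.List.foldl_append_singleton_eq_map]
  simp only [List.nil_append]
  apply List.map_congr_left
  intro z hz
  have hzb : 0 ≤ z ∧ z < K := PySem.List.mem_pyRange_one.mp hz
  have hzn : z.toNat < n := by omega
  have hget : PySem.List.pyGetD D z false = D.getD z.toNat false :=
    PySem.List.pyGetD_of_nonneg D false hzb.1
  have hzc : ((z.toNat : Nat) : Int) = z := by omega
  have hm2 : PySem.Int.mod z 2 = ((z.toNat % 2 : Nat) : Int) := by
    rw [← hzc]; exact_mod_cast PySem.Int.mod_natCast z.toNat 2
  have hm3 : PySem.Int.mod z 3 = ((z.toNat % 3 : Nat) : Int) := by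
    rw [← hzc]; exact_mod_cast PySem.Int.mod_natCast z.toNat 3
  rw [hget, hval z.toNat hzn, hm2, hm3]
  by_cases h2 : z.toNat % 2 = 0 <;> by_cases h3 : z.toNat % 3 = 2 <;>
    simp [h2, h3] <;> omega
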